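-- pv_equiv track=rewrite | github.com/agessaman/meshcore-bot | modules/commands/multitest_command.py | _shrink_display_lcp
-- ===== SOURCE A (Python) =====
-- def _is_strict_prefix(a: list[str], b: list[str]) -> bool:
--     return len(a) < len(b) and b[: len(a)] == a
--
-- def _shrink_display_lcp(maximal: list[list[str]], lcp: list[str]) -> list[str]:
--     """Shorten displayed LCP when one path ends exactly at LCP and another continues past it.
--
--     Avoids showing the shorter path as the 'trunk' with only the tail as a branch (e.g. …0101
--     on the common line and └ 0970), which reads like a single endpoint plus an offshoot.
--     """
--     lcp = list(lcp)
--     while len(lcp) > 1: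
--         has_exact = any(t == lcp for t in maximal)
--         has_extend = any(_is_strict_prefix(lcp, t) for t in maximal)
--         if has_exact and has_extend:
--             lcp.pop()
--         else:
--             break
--     return lcp
-- ===== SOURCE B (Python) =====
-- def _shrink_display_lcp(maximal, lcp):
--     """One pass over maximal: per path, record its common-prefix length with lcp;
--     then walk k down from len(lcp) using only the precomputed data."""
--     L = len(lcp)
--     ext = 0            # longest k such that some path strictly extends lcp[:k]
--     exact_lens = set() # lengths k such that some path equals lcp[:k]
--     for t in maximal:
--         c = 0
--         while c < len(t) and c < L and t[c] == lcp[c]: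
--             c += 1
--         ext = max(ext, min(c, len(t) - 1))
--         if c == len(t):
--             exact_lens.add(len(t))
--     k = L
--     while k > 1 and k in exact_lens and k <= ext:
--         k -= 1
--     return lcp[:k]
-- ===== Notes on version B (the rewrite author's own statement) =====
-- stated objective: alternative
-- what changed: Replaces the shrink-and-rescan loop (each pop rescans all paths with list-slice comparisons) by one pass that records each path's common-prefix length with lcp, then decides each shrink step from an int bound and a set of lengths; same exact result, different traversal (it trades A's repeated whole-list scans for a single scan plus a countdown, without being measurably faster in CPython).
import Mathlib
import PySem

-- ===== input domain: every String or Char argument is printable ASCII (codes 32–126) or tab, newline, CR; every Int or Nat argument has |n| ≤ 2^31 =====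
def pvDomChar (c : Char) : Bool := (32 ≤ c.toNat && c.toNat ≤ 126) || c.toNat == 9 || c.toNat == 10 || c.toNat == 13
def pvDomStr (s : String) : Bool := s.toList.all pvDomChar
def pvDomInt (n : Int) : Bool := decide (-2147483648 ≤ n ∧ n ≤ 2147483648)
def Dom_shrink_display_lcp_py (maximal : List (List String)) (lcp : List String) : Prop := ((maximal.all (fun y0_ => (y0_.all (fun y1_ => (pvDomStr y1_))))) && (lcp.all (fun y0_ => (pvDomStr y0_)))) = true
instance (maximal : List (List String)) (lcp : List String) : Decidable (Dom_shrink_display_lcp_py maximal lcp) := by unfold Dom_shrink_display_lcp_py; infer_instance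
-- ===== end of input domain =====

-- B is an alternative algorithm: one pass records each path's common-prefix length with lcp,
-- then every shrink step is decided from an int bound and a set of lengths (no rescan of maximal).

-- ===== PORT A =====
-- _is_strict_prefix(a, b): len(a) < len(b) and b[:len(a)] == a
def pvIsStrictPrefix (a b : List String) : Bool :=
  decide (a.length < b.length) && decide (b.take a.length = a)

-- A's while loop: drop the last element of lcp while some path equals it and some path extends it
def pvShrinkLoopA (maximal : List (List String)) (lcp : List String) : List String :=
  if lcp.length > 1 then
    if (maximal.any (fun t => decide (t = lcp))) && (maximal.any (fun t => pvIsStrictPrefix lcp t)) then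
      pvShrinkLoopA maximal lcp.dropLast
    else lcp
  else lcp
termination_by lcp.length
decreasing_by simp [List.length_dropLast]; omega

def shrink_display_lcp_py (maximal : List (List String)) (lcp : List String) : List String :=
  pvShrinkLoopA maximal lcp

-- ===== PORT B =====
-- B's inner while loop: common-prefix length of t and lcp
def pvCpl (t lcp : List String) : Nat :=
  match t, lcp with
  | a :: as, b :: bs => if a = b then pvCpl as bs + 1 else 0
  | _, _ => 0

-- B's single pass over maximal, accumulating (ext, exact_lens)
def pvScan (maximal : List (List String)) (lcp : List String) : Int × PySem.Set Nat :=
  maximal.foldl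
    (fun acc t =>
      let c := pvCpl t lcp
      (max acc.1 (min (c : Int) ((t.length : Int) - 1)),
       if c = t.length then PySem.Set.add acc.2 t.length else acc.2))
    (0, PySem.Set.empty)

-- B's countdown loop over k
def pvShrinkLoopB (S : PySem.Set Nat) (ext : Int) : Nat → Nat
  | 0 => 0
  | 1 => 1
  | (k + 2) =>
    if PySem.Set.contains S (k + 2) && decide (((k : Int) + 2) ≤ ext) then
      pvShrinkLoopB S ext (k + 1)
    else k + 2

def shrink_display_lcp_py_alt (maximal : List (List String)) (lcp : List String) : List String :=
  let p := pvScan maximal lcp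
  lcp.take (pvShrinkLoopB p.2 p.1 lcp.length)

-- ===== PRECONDITION & SPEC =====
def Spec_shrink_display_lcp_py (maximal : List (List String)) (lcp : List String) (out : List String) : Prop := out = shrink_display_lcp_py_alt maximal lcp
instance (maximal : List (List String)) (lcp : List String) (out : List String) : Decidable (Spec_shrink_display_lcp_py maximal lcp out) := by unfold Spec_shrink_display_lcp_py; infer_instance

-- ===== CLAIM (what is proved, stated in full; the proofs are below) =====
def Claim_equal_shrink_display_lcp_py : Prop := ∀ (maximal : List (List String)) (lcp : List String), Dom_shrink_display_lcp_py maximal lcp → Spec_shrink_display_lcp_py maximal lcp (shrink_display_lcp_py maximal lcp)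

-- ===== LEMMAS AND PROOFS =====

-- pvCpl is the longest-common-prefix length: k ≤ pvCpl t l iff the length-k takes agree
theorem pvCpl_spec (t l : List String) (k : Nat) :
    k ≤ pvCpl t l ↔ k ≤ t.length ∧ k ≤ l.length ∧ t.take k = l.take k := by
  induction t generalizing l k with
  | nil => cases k <;> simp [pvCpl]
  | cons a as ih =>
    cases l with
    | nil => cases k <;> simp [pvCpl]
    | cons b bs =>
      cases k with
      | zero => simp
      | succ k =>
        by_cases hab : a = b
        · subst hab
          simp [pvCpl, List.take_succ_cons, ih bs k]
        · simp [pvCpl, List.take_succ_cons, hab]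

-- fold invariant for the set component of pvScan
theorem pvScan_mem_aux (lcp : List String) (maximal : List (List String)) (m : Nat) :
    ∀ acc : Int × PySem.Set Nat,
      m ∈ (maximal.foldl
        (fun acc t =>
          let c := pvCpl t lcp
          (max acc.1 (min (c : Int) ((t.length : Int) - 1)),
           if c = t.length then PySem.Set.add acc.2 t.length else acc.2)) acc).2 ↔
      m ∈ acc.2 ∨ ∃ t ∈ maximal, pvCpl t lcp = t.length ∧ t.length = m := by
  induction maximal with
  | nil => simp
  | cons t ms ih =>
    intro acc
    simp only [List.foldl_cons, ih, List.mem_cons]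
    by_cases h : pvCpl t lcp = t.length
    · simp [h, PySem.Set.mem_add]
      tauto
    · simp [h]

-- fold invariant for the int component of pvScan
theorem pvScan_ext_aux (lcp : List String) (maximal : List (List String)) (k : Int) :
    ∀ acc : Int × PySem.Set Nat,
      (k ≤ (maximal.foldl
        (fun acc t =>
          let c := pvCpl t lcp
          (max acc.1 (min (c : Int) ((t.length : Int) - 1)),
           if c = t.length then PySem.Set.add acc.2 t.length else acc.2)) acc).1) ↔
      k ≤ acc.1 ∨ ∃ t ∈ maximal, k ≤ min ((pvCpl t lcp : Int)) ((t.length : Int) - 1) := by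
  induction maximal with
  | nil => simp
  | cons t ms ih =>
    intro acc
    simp only [List.foldl_cons, ih, List.mem_cons, le_max_iff]
    constructor
    · rintro (⟨h | h⟩ | ⟨u, hu, hk⟩)
      · exact Or.inl h
      · exact Or.inr ⟨t, Or.inl rfl, h⟩
      · exact Or.inr ⟨u, Or.inr hu, hk⟩
    · rintro (h | ⟨u, rfl | hu, hk⟩)
      · exact Or.inl (Or.inl h)
      · exact Or.inl (Or.inr hk)
      · exact Or.inr ⟨u, hu, hk⟩

-- membership in the scanned set says "some path equals lcp[:m]" (in pvCpl form)
theorem pvScan_set_mem (maximal : List (List String)) (lcp : List String) (m : Nat) :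
    m ∈ (pvScan maximal lcp).2 ↔ ∃ t ∈ maximal, pvCpl t lcp = t.length ∧ t.length = m := by
  have := pvScan_mem_aux lcp maximal m (0, PySem.Set.empty)
  simpa [pvScan, PySem.Set.empty] using this

-- the scanned int bound says "some path strictly extends lcp[:k]" (in pvCpl form), for k ≥ 1
theorem pvScan_ext_ge (maximal : List (List String)) (lcp : List String) (k : Nat) (hk : 1 ≤ k) :
    ((k : Int) ≤ (pvScan maximal lcp).1) ↔ ∃ t ∈ maximal, k ≤ pvCpl t lcp ∧ k < t.length := by
  have := pvScan_ext_aux lcp maximal (k : Int) (0, PySem.Set.empty)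
  rw [pvScan, this]
  have h0 : ¬ ((k : Int) ≤ 0) := by omega
  simp only [h0, false_or, le_min_iff]
  constructor
  · rintro ⟨t, ht, h1, h2⟩
    exact ⟨t, ht, by exact_mod_cast h1, by omega⟩
  · rintro ⟨t, ht, h1, h2⟩
    exact ⟨t, ht, by exact_mod_cast h1, by omega⟩

theorem pvCpl_le (t l : List String) : pvCpl t l ≤ t.length :=
  ((pvCpl_spec t l (pvCpl t l)).mp le_rfl).1

-- A's has_exact on lcp[:n] equals B's set membership
theorem pvExact_iff (maximal : List (List String)) (lcp : List String) (n : Nat) (hn : n ≤ lcp.length) :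
    (maximal.any (fun t => decide (t = lcp.take n))) = true ↔ n ∈ (pvScan maximal lcp).2 := by
  rw [pvScan_set_mem, List.any_eq_true]
  apply exists_congr; intro t
  simp only [decide_eq_true_eq]
  constructor
  · rintro ⟨ht, rfl⟩
    have hlen : (lcp.take n).length = n := by simp [List.length_take]; omega
    refine ⟨ht, ?_, hlen⟩
    have h2 : (lcp.take n).length ≤ pvCpl (lcp.take n) lcp := by
      rw [pvCpl_spec]
      exact ⟨le_rfl, by omega, by rw [List.take_take, hlen]; simp⟩
    exact le_antisymm (pvCpl_le _ _) h2
  · rintro ⟨ht, hc, hl⟩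
    refine ⟨ht, ?_⟩
    have := (pvCpl_spec t lcp n).mp (by omega)
    rw [← this.2.2, ← hl, List.take_length]

-- A's has_extend on lcp[:n] equals B's int bound
theorem pvExt_iff (maximal : List (List String)) (lcp : List String) (n : Nat) (h1 : 1 ≤ n) (hn : n ≤ lcp.length) :
    (maximal.any (fun t => pvIsStrictPrefix (lcp.take n) t)) = true ↔ ((n : Int) ≤ (pvScan maximal lcp).1) := by
  rw [pvScan_ext_ge maximal lcp n h1, List.any_eq_true]
  apply exists_congr; intro t
  have hlen : (lcp.take n).length = n := by simp [List.length_take]; omega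
  simp only [pvIsStrictPrefix, Bool.and_eq_true, decide_eq_true_eq, hlen]
  constructor
  · rintro ⟨ht, hlt, heq⟩
    refine ⟨ht, ?_, hlt⟩
    rw [pvCpl_spec]
    exact ⟨by omega, hn, heq⟩
  · rintro ⟨ht, hc, hlt⟩
    have := (pvCpl_spec t lcp n).mp hc
    exact ⟨ht, hlt, this.2.2⟩

-- main loop correspondence: A's loop on lcp[:k] equals lcp[: B's loop result]
theorem pvLoop_eq (maximal : List (List String)) (lcp : List String) :
    ∀ k, k ≤ lcp.length →
    pvShrinkLoopA maximal (lcp.take k) =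
      lcp.take (pvShrinkLoopB (pvScan maximal lcp).2 (pvScan maximal lcp).1 k) := by
  intro k
  induction k using Nat.strong_induction_on with
  | _ k ih =>
    match k with
    | 0 => intro _; rw [pvShrinkLoopA]; simp [pvShrinkLoopB]
    | 1 => intro _; rw [pvShrinkLoopA]; simp [pvShrinkLoopB, List.length_take]
    | (k+2) =>
      intro h
      have hlen : (lcp.take (k+2)).length = k+2 := by simp [List.length_take]; omega
      rw [pvShrinkLoopA, hlen]
      rw [if_pos (by omega)]
      rw [pvShrinkLoopB]
      by_cases hc : (k+2) ∈ (pvScan maximal lcp).2 ∧ ((k : Int) + 2) ≤ (pvScan maximal lcp).1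
      · have hb1 := (pvExact_iff maximal lcp (k+2) h).mpr hc.1
        have hb2 := (pvExt_iff maximal lcp (k+2) (by omega) h).mpr (by exact_mod_cast hc.2)
        rw [hb1, hb2]
        simp only [Bool.and_self, if_true]
        have hct : PySem.Set.contains (pvScan maximal lcp).2 (k+2) = true := by
          simp [PySem.Set.contains]; exact hc.1
        rw [hct, decide_eq_true hc.2]
        simp only [Bool.and_self, if_true]
        have hdl : (lcp.take (k+2)).dropLast = lcp.take (k+1) := by
          rw [List.dropLast_eq_take, List.take_take]; congr 1; simp [List.length_take]; omega
        rw [hdl]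
        exact ih (k+1) (by omega) (by omega)
      · have hbool : ¬ ((maximal.any (fun t => decide (t = lcp.take (k+2)))) = true ∧
            (maximal.any (fun t => pvIsStrictPrefix (lcp.take (k+2)) t)) = true) := by
          rw [pvExact_iff maximal lcp (k+2) h, pvExt_iff maximal lcp (k+2) (by omega) h]
          intro hx; exact hc ⟨hx.1, by exact_mod_cast hx.2⟩
        have hA : ((maximal.any (fun t => decide (t = lcp.take (k+2)))) &&
            (maximal.any (fun t => pvIsStrictPrefix (lcp.take (k+2)) t))) = false := by
          cases hx1 : (maximal.any (fun t => decide (t = lcp.take (k+2)))) with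
          | false => simp
          | true =>
            cases hx2 : (maximal.any (fun t => pvIsStrictPrefix (lcp.take (k+2)) t)) with
            | false => simp
            | true => exact absurd ⟨hx1, hx2⟩ hbool
        have hB : (PySem.Set.contains (pvScan maximal lcp).2 (k+2) && decide (((k : Int) + 2) ≤ (pvScan maximal lcp).1)) = false := by
          rw [Bool.and_eq_false_iff]
          by_cases hm : (k+2) ∈ (pvScan maximal lcp).2
          · refine Or.inr ?_
            simp only [decide_eq_false_iff_not]
            exact fun hle => hc ⟨hm, hle⟩
          · exact Or.inl (by simp [PySem.Set.contains]; exact hm)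
        rw [hA, hB]
        simp

-- ===== VERDICT (by name: the statement is the Claim_ definition above) =====
theorem shrink_display_lcp_py_spec : Claim_equal_shrink_display_lcp_py := by
  intro maximal lcp _
  unfold Spec_shrink_display_lcp_py shrink_display_lcp_py shrink_display_lcp_py_alt
  simpa using pvLoop_eq maximal lcp lcp.length le_rfl
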